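-- pv_equiv track=rewrite | github.com/robai2002/Leetcode | Problems/3946-find-maximum-balanced-xor-subarray-length/find-maximum-balanced-xor-subarray-length.py | maxBalancedSubarray
-- ===== SOURCE A (Python) =====
-- from typing import List
--
-- def maxBalancedSubarray(nums: List[int]) -> int:
--     d = dict()
--     d[(0,0)] = -1
--     oe = 0
--     x = 0
--     ans = 0
--     for ind,num in enumerate(nums):
--         x^=num
--         if num&1:
--             oe-=1
--         else:
--             oe += 1
--         if (oe,x) in d:
--             ans = max(ans,ind-d[(oe,x)])
--         else:
--             d[(oe,x)] = ind
--     return ans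
-- ===== SOURCE B (Python) =====
-- from typing import List
--
-- def maxBalancedSubarray(nums: List[int]) -> int:
--     # Brute force: scan every suffix, keeping a running parity balance and xor;
--     # whenever both are zero the prefix of the suffix is a balanced subarray.
--     ans = 0
--     suffix = nums
--     while suffix:
--         bal = 0
--         x = 0
--         cnt = 0
--         for num in suffix:
--             x ^= num
--             bal += 1 if num & 1 == 0 else -1
--             cnt += 1
--             if bal == 0 and x == 0:
--                 ans = max(ans, cnt)
--         suffix = suffix[1:]
--     return ans
-- ===== Notes on version B (the rewrite author's own statement) =====
-- stated objective: alternative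
-- what changed: Replaced the single-pass hashmap of first occurrences of prefix (parity,xor) states by a brute-force double scan: for every suffix, a running parity balance and running xor are maintained and each balanced prefix length of the suffix updates a running max.
import Mathlib
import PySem

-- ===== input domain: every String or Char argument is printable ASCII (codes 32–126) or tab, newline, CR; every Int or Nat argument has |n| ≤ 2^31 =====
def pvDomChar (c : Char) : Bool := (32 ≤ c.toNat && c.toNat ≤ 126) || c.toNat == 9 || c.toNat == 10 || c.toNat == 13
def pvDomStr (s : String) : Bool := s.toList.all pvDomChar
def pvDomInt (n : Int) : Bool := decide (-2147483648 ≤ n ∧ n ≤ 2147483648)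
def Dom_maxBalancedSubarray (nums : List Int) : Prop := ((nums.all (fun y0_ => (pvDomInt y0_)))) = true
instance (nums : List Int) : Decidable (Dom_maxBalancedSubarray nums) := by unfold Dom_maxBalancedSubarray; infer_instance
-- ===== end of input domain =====

-- B replaces A's single-pass first-occurrence hashmap over prefix (parity, xor) states by a
-- brute-force scan of every suffix with a running balance/xor (alternative decomposition, not faster).


-- ===== PORT A =====
-- literal transliteration of A: dict keyed by (parity balance, running xor) holding first index - shifted by the seed (0,0) ↦ -1
def maxBalancedSubarray (nums : List Int) : Int :=
  ((PySem.List.enumerate nums).foldl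
    (fun (st : PySem.Dict (Int × Int) Int × Int × Int × Int) p =>
      let d := st.1
      let oe := st.2.1
      let x := st.2.2.1
      let ans := st.2.2.2
      let x := PySem.Int.bxor x p.2
      let oe := if PySem.Int.band p.2 1 ≠ 0 then oe - 1 else oe + 1
      match d.get? (oe, x) with
      | some v => (d, oe, x, max ans (p.1 - v))
      | none => (d.insert (oe, x) p.1, oe, x, ans))
    ((PySem.Dict.empty).insert (0, 0) (-1), 0, 0, 0)).2.2.2

-- ===== PORT B =====
-- literal transliteration of B: inner 'for num in suffix' loop, state (bal, x, cnt, ans)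
def mbsInner (l : List Int) (ans : Int) : Int :=
  (l.foldl
    (fun (st : Int × Int × Int × Int) num =>
      let bal := st.1
      let x := st.2.1
      let cnt := st.2.2.1
      let ans := st.2.2.2
      let x := PySem.Int.bxor x num
      let bal := if PySem.Int.band num 1 = 0 then bal + 1 else bal - 1
      let cnt := cnt + 1
      (bal, x, cnt, if bal = 0 ∧ x = 0 then max ans cnt else ans))
    (0, 0, 0, ans)).2.2.2

-- the 'while suffix: … ; suffix = suffix[1:]' loop of B
def mbsGo : List Int → Int → Int
  | [], ans => ans
  | n :: t, ans => mbsGo t (mbsInner (n :: t) ans)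

def maxBalancedSubarray_alt (nums : List Int) : Int := mbsGo nums 0

-- ===== PRECONDITION & SPEC =====
def Spec_maxBalancedSubarray (nums : List Int) (out : Int) : Prop := out = maxBalancedSubarray_alt nums
instance (nums : List Int) (out : Int) : Decidable (Spec_maxBalancedSubarray nums out) := by unfold Spec_maxBalancedSubarray; infer_instance

-- ===== CLAIM (what is proved, stated in full; the proofs are below) =====
def Claim_equal_maxBalancedSubarray : Prop := ∀ (nums : List Int), Dom_maxBalancedSubarray nums → Spec_maxBalancedSubarray nums (maxBalancedSubarray nums)

-- ===== LEMMAS AND PROOFS =====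


theorem bx_nn {a b : Int} (ha : 0 ≤ a) (hb : 0 ≤ b) :
    PySem.Int.bxor a b = ((a.toNat ^^^ b.toNat : Nat) : Int) := by
  unfold PySem.Int.bxor; rw [if_pos ha, if_pos hb]

theorem bx_nneg {a b : Int} (ha : 0 ≤ a) (hb : b < 0) :
    PySem.Int.bxor a b = -((a.toNat ^^^ (-b - 1).toNat : Nat) : Int) - 1 := by
  unfold PySem.Int.bxor; rw [if_pos ha, if_neg (by omega)]

theorem bx_negn {a b : Int} (ha : a < 0) (hb : 0 ≤ b) :
    PySem.Int.bxor a b = -(((-a - 1).toNat ^^^ b.toNat : Nat) : Int) - 1 := by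
  unfold PySem.Int.bxor; rw [if_neg (by omega), if_pos hb]

theorem bx_negneg {a b : Int} (ha : a < 0) (hb : b < 0) :
    PySem.Int.bxor a b = (((-a - 1).toNat ^^^ (-b - 1).toNat : Nat) : Int) := by
  unfold PySem.Int.bxor; rw [if_neg (by omega), if_neg (by omega)]

theorem pvBxor_assoc (a b c : Int) : PySem.Int.bxor (PySem.Int.bxor a b) c = PySem.Int.bxor a (PySem.Int.bxor b c) := by
  by_cases ha : 0 ≤ a <;> by_cases hb : 0 ≤ b <;> by_cases hc : 0 ≤ c
  · rw [bx_nn ha hb, bx_nn (by positivity) hc, bx_nn hb hc, bx_nn ha (by positivity)]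
    simp [Nat.xor_assoc]
  · rw [bx_nn ha hb, bx_nneg (by positivity) (show c < 0 by omega), bx_nneg hb (show c < 0 by omega), bx_nneg ha (by omega)]
    simp [Nat.xor_assoc]
  · rw [bx_nneg ha (show b < 0 by omega), bx_negn (by omega) hc, bx_negn (show b < 0 by omega) hc, bx_nneg ha (by omega)]
    simp [Nat.xor_assoc]
  · rw [bx_nneg ha (show b < 0 by omega), bx_negneg (by omega) (show c < 0 by omega), bx_negneg (show b < 0 by omega) (show c < 0 by omega), bx_nn ha (by positivity)]
    simp [Nat.xor_assoc]
  · rw [bx_negn (show a < 0 by omega) hb, bx_negn (by omega) hc, bx_nn hb hc, bx_negn (show a < 0 by omega) (by positivity)]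
    simp [Nat.xor_assoc]
  · rw [bx_negn (show a < 0 by omega) hb, bx_negneg (by omega) (show c < 0 by omega), bx_nneg hb (show c < 0 by omega), bx_negneg (show a < 0 by omega) (by omega)]
    simp [Nat.xor_assoc]
  · rw [bx_negneg (show a < 0 by omega) (show b < 0 by omega), bx_nn (by positivity) hc, bx_negn (show b < 0 by omega) hc, bx_negneg (show a < 0 by omega) (by omega)]
    simp [Nat.xor_assoc]
  · rw [bx_negneg (show a < 0 by omega) (show b < 0 by omega), bx_nneg (by positivity) (show c < 0 by omega), bx_negneg (show b < 0 by omega) (show c < 0 by omega), bx_negn (show a < 0 by omega) (by positivity)]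
    simp [Nat.xor_assoc]
theorem pvBxor_zero_left (a : Int) : PySem.Int.bxor 0 a = a := by
  rw [PySem.Int.bxor_comm]; exact PySem.Int.bxor_zero a

theorem pvBxor_eq_self_iff (a b : Int) : PySem.Int.bxor a b = a ↔ b = 0 := by
  constructor
  · intro h
    have h2 : PySem.Int.bxor a (PySem.Int.bxor a b) = b := by
      rw [← pvBxor_assoc, PySem.Int.bxor_self, pvBxor_zero_left]
    rw [h, PySem.Int.bxor_self] at h2
    omega
  · rintro rfl; exact PySem.Int.bxor_zero a
def pstep (s : Int × Int) (num : Int) : Int × Int :=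
  (if PySem.Int.band num 1 ≠ 0 then s.1 - 1 else s.1 + 1, PySem.Int.bxor s.2 num)
def pre (l : List Int) : Int × Int := l.foldl pstep (0, 0)

theorem foldl_pstep_shift (q : List Int) : ∀ s : Int × Int,
    q.foldl pstep s = (s.1 + (pre q).1, PySem.Int.bxor s.2 (pre q).2) := by
  induction q with
  | nil => intro s; simp [pre, PySem.Int.bxor_zero]
  | cons n q ih =>
    intro s
    have hq : pre (n :: q) = ((pstep (0,0) n).1 + (pre q).1, PySem.Int.bxor (pstep (0,0) n).2 (pre q).2) := by
      simpa [pre] using ih (pstep (0, 0) n)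
    rw [show (n :: q).foldl pstep s = q.foldl pstep (pstep s n) from rfl, ih (pstep s n), hq]
    unfold pstep
    by_cases h : PySem.Int.band n 1 ≠ 0 <;>
      simp [h, pvBxor_zero_left, ← pvBxor_assoc] <;> ring

theorem foldl_pstep_fixed (q : List Int) (s : Int × Int) :
    q.foldl pstep s = s ↔ pre q = (0, 0) := by
  rw [foldl_pstep_shift, Prod.ext_iff, Prod.ext_iff]
  constructor
  · rintro ⟨h1, h2⟩
    exact ⟨by omega, (pvBxor_eq_self_iff _ _).1 h2⟩
  · rintro ⟨h1, h2⟩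
    simp at h1 h2
    simp [h1, h2, PySem.Int.bxor_zero]

theorem good_bridge (nums : List Int) (t c : Nat) :
    pre (nums.take (t + c)) = pre (nums.take t) ↔ pre ((nums.drop t).take c) = (0, 0) := by
  rw [show pre (nums.take (t+c)) = ((nums.drop t).take c).foldl pstep (pre (nums.take t)) by
    rw [pre, List.take_add, List.foldl_append]; rfl]
  exact foldl_pstep_fixed _ _

def bstep (st : Int × Int × Int × Int) (num : Int) : Int × Int × Int × Int :=
  let bal := st.1
  let x := st.2.1
  let cnt := st.2.2.1
  let ans := st.2.2.2
  let x := PySem.Int.bxor x num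
  let bal := if PySem.Int.band num 1 = 0 then bal + 1 else bal - 1
  let cnt := cnt + 1
  (bal, x, cnt, if bal = 0 ∧ x = 0 then max ans cnt else ans)

theorem bstep_apply (s : Int × Int) (cnt ans n : Int) :
    bstep (s.1, s.2, cnt, ans) n =
      ((pstep s n).1, (pstep s n).2, cnt + 1,
        if pstep s n = (0, 0) then max ans (cnt + 1) else ans) := by
  unfold bstep pstep
  by_cases h : PySem.Int.band n 1 = 0 <;> simp [h, Prod.ext_iff]

theorem inner_ge (l : List Int) : ∀ (s : Int × Int) (cnt ans : Int),
    ans ≤ (l.foldl bstep (s.1, s.2, cnt, ans)).2.2.2 := by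
  induction l with
  | nil => intro s cnt ans; simp
  | cons n l ih =>
    intro s cnt ans
    rw [List.foldl_cons, bstep_apply]
    refine le_trans ?_ (ih (pstep s n) (cnt + 1) _)
    split <;> simp

theorem inner_ub (l : List Int) : ∀ (s : Int × Int) (cnt ans : Int) (c : Nat),
    1 ≤ c → c ≤ l.length → (l.take c).foldl pstep s = (0, 0) →
    cnt + (c : Int) ≤ (l.foldl bstep (s.1, s.2, cnt, ans)).2.2.2 := by
  induction l with
  | nil => intro s cnt ans c h1 h2 _; simp at h2; omega
  | cons n l ih =>
    intro s cnt ans c h1 h2 h3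
    obtain ⟨c', rfl⟩ : ∃ c', c = c' + 1 := ⟨c - 1, by omega⟩
    rw [List.take_succ_cons, List.foldl_cons] at h3
    rw [List.foldl_cons, bstep_apply]
    rcases Nat.eq_zero_or_pos c' with hc | hc
    · subst hc
      simp at h3
      rw [if_pos h3]
      have := inner_ge l (pstep s n) (cnt + 1) (max ans (cnt + 1))
      push_cast
      have h4 : cnt + 1 ≤ max ans (cnt + 1) := le_max_right _ _
      omega
    · have := ih (pstep s n) (cnt + 1) (if pstep s n = (0, 0) then max ans (cnt + 1) else ans)
        c' hc (by simpa using h2) h3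
      push_cast at this ⊢
      omega

theorem inner_lb (l : List Int) : ∀ (s : Int × Int) (cnt ans : Int),
    (l.foldl bstep (s.1, s.2, cnt, ans)).2.2.2 = ans ∨
    ∃ c : Nat, 1 ≤ c ∧ c ≤ l.length ∧ (l.take c).foldl pstep s = (0, 0) ∧
      (l.foldl bstep (s.1, s.2, cnt, ans)).2.2.2 = cnt + (c : Int) := by
  induction l with
  | nil => intro s cnt ans; left; simp
  | cons n l ih =>
    intro s cnt ans
    rw [List.foldl_cons, bstep_apply]
    rcases ih (pstep s n) (cnt + 1) (if pstep s n = (0, 0) then max ans (cnt + 1) else ans) with h | ⟨c, hc1, hc2, hc3, hc4⟩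
    · by_cases hz : pstep s n = (0, 0)
      · rw [if_pos hz] at h
        rcases max_choice ans (cnt + 1) with hm | hm
        · left; rw [if_pos hz, h, hm]
        · right
          exact ⟨1, le_refl 1, by simp, by simp [hz],
            by rw [if_pos hz, h, hm]; push_cast; ring⟩
      · left; rw [if_neg hz] at h ⊢; exact h
    · right
      refine ⟨c + 1, by omega, by simpa using Nat.succ_le_succ hc2, ?_, by rw [hc4]; push_cast; ring⟩
      rw [List.take_succ_cons, List.foldl_cons]
      exact hc3

def GoodSub (nums : List Int) (t c : Nat) : Prop :=
  1 ≤ c ∧ t + c ≤ nums.length ∧ pre ((nums.drop t).take c) = (0, 0)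

theorem mbsInner_eq (l : List Int) (ans : Int) :
    mbsInner l ans = (l.foldl bstep (((0 : Int), (0 : Int)).1, ((0 : Int), (0 : Int)).2, 0, ans)).2.2.2 := rfl

theorem mbsGo_ge (l : List Int) : ∀ ans : Int, ans ≤ mbsGo l ans := by
  induction l with
  | nil => intro ans; simp [mbsGo]
  | cons n l ih =>
    intro ans
    rw [mbsGo]
    refine le_trans ?_ (ih _)
    rw [mbsInner_eq]
    exact inner_ge _ _ _ _

theorem mbsGo_ub (l : List Int) : ∀ (ans : Int) (t c : Nat), GoodSub l t c → (c : Int) ≤ mbsGo l ans := by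
  induction l with
  | nil => intro ans t c ⟨h1, h2, _⟩; simp at h2; omega
  | cons n l ih =>
    intro ans t c hg
    obtain ⟨h1, h2, h3⟩ := hg
    rw [mbsGo]
    cases t with
    | zero =>
      refine le_trans ?_ (mbsGo_ge l _)
      rw [mbsInner_eq]
      have := inner_ub (n :: l) (0, 0) 0 ans c h1 (by simpa using h2) (by simpa [pre] using h3)
      omega
    | succ t0 =>
      exact ih _ t0 c ⟨h1, by simp at h2 ⊢; omega, h3⟩

theorem mbsGo_lb (l : List Int) : ∀ ans : Int,
    mbsGo l ans = ans ∨ ∃ t c : Nat, GoodSub l t c ∧ mbsGo l ans = (c : Int) := by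
  induction l with
  | nil => intro ans; left; rfl
  | cons n l ih =>
    intro ans
    rw [mbsGo]
    rcases ih (mbsInner (n :: l) ans) with h | ⟨t, c, hg, hv⟩
    · rw [h, mbsInner_eq]
      rcases inner_lb (n :: l) (0, 0) 0 ans with h2 | ⟨c, hc1, hc2, hc3, hc4⟩
      · left; exact h2
      · right
        exact ⟨0, c, ⟨hc1, by simpa using hc2, by simpa [pre] using hc3⟩, by omega⟩
    · right
      obtain ⟨h1, h2, h3⟩ := hg
      exact ⟨t + 1, c, ⟨h1, by simp; omega, h3⟩, hv⟩

def Fo (nums : List Int) : Nat → (Int × Int) → Option Nat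
  | 0, s => if pre (nums.take 0) = s then some 0 else none
  | k + 1, s =>
    match Fo nums k s with
    | some t => some t
    | none => if pre (nums.take (k + 1)) = s then some (k + 1) else none

theorem Fo_none (nums : List Int) : ∀ (k : Nat) (s : Int × Int),
    Fo nums k s = none → ∀ t ≤ k, pre (nums.take t) ≠ s := by
  intro k
  induction k with
  | zero =>
    intro s h t ht
    interval_cases t
    simp only [Fo] at h
    intro hc; rw [if_pos hc] at h; simp at h
  | succ k ih =>
    intro s h t ht
    have hk : Fo nums k s = none := by
      cases h2 : Fo nums k s with
      | none => rfl
      | some t' => rw [show Fo nums (k+1) s = some t' by simp only [Fo, h2]] at h; simp at h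
    rcases Nat.le_succ_iff_eq_or_le.1 ht with rfl | h3
    · simp only [Fo, hk] at h
      intro hc; rw [if_pos hc] at h; simp at h
    · exact ih s hk t h3

theorem Fo_spec (nums : List Int) : ∀ (k : Nat) (s : Int × Int) (t0 : Nat),
    Fo nums k s = some t0 → t0 ≤ k ∧ pre (nums.take t0) = s ∧
      ∀ t ≤ k, pre (nums.take t) = s → t0 ≤ t := by
  intro k
  induction k with
  | zero =>
    intro s t0 h
    simp only [Fo] at h
    split at h
    · cases h; exact ⟨le_refl 0, by assumption, fun t _ _ => Nat.zero_le t⟩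
    · simp at h
  | succ k ih =>
    intro s t0 h
    cases h2 : Fo nums k s with
    | some t' =>
      simp only [Fo, h2] at h
      obtain rfl : t' = t0 := Option.some.inj h
      obtain ⟨ha, hb, hc⟩ := ih s t' h2
      refine ⟨Nat.le_succ_of_le ha, hb, fun t ht hp => ?_⟩
      rcases Nat.le_succ_iff_eq_or_le.1 ht with rfl | ht'
      · omega
      · exact hc t ht' hp
    | none =>
      simp only [Fo, h2] at h
      split at h
      · obtain rfl : k + 1 = t0 := Option.some.inj h
        refine ⟨le_refl _, by assumption, fun t ht hp => ?_⟩
        rcases Nat.le_succ_iff_eq_or_le.1 ht with rfl | ht'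
        · omega
        · exact absurd hp (Fo_none nums k s h2 t ht')
      · simp at h

def astep (st : PySem.Dict (Int × Int) Int × Int × Int × Int) (p : Int × Int) :
    PySem.Dict (Int × Int) Int × Int × Int × Int :=
  let d := st.1
  let oe := st.2.1
  let x := st.2.2.1
  let ans := st.2.2.2
  let x := PySem.Int.bxor x p.2
  let oe := if PySem.Int.band p.2 1 ≠ 0 then oe - 1 else oe + 1
  match d.get? (oe, x) with
  | some v => (d, oe, x, max ans (p.1 - v))
  | none => (d.insert (oe, x) p.1, oe, x, ans)

theorem astep_apply (d : PySem.Dict (Int × Int) Int) (oe x ans i num : Int) :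
    astep (d, oe, x, ans) (i, num) =
      match d.get? (pstep (oe, x) num) with
      | some v => (d, (pstep (oe, x) num).1, (pstep (oe, x) num).2, max ans (i - v))
      | none => (d.insert (pstep (oe, x) num) i, (pstep (oe, x) num).1, (pstep (oe, x) num).2, ans) := rfl

def InvA (nums : List Int) (k : Nat) (st : PySem.Dict (Int × Int) Int × Int × Int × Int) : Prop :=
  (st.2.1, st.2.2.1) = pre (nums.take k) ∧
  (∀ s, st.1.get? s = (Fo nums k s).map (fun t => (t : Int) - 1)) ∧
  0 ≤ st.2.2.2 ∧
  (∀ t u : Nat, t < u → u ≤ k → pre (nums.take u) = pre (nums.take t) → (u : Int) - t ≤ st.2.2.2) ∧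
  (st.2.2.2 = 0 ∨ ∃ t u : Nat, t < u ∧ u ≤ nums.length ∧
    pre (nums.take u) = pre (nums.take t) ∧ st.2.2.2 = (u : Int) - t)

theorem InvA_step (nums : List Int) (k : Nat) (n : Int) (hlt : k < nums.length)
    (hn : nums[k]? = some n) (st : PySem.Dict (Int × Int) Int × Int × Int × Int)
    (hInv : InvA nums k st) : InvA nums (k + 1) (astep st ((k : Int), n)) := by
  obtain ⟨d, oe, x, ans⟩ := st
  obtain ⟨hpre, hd, hnn, hub, hlb⟩ := hInv
  simp only at hpre hd hnn hub hlb
  have htake : nums.take (k + 1) = nums.take k ++ [n] := by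
    rw [List.take_add_one, hn]; rfl
  have hpre' : pre (nums.take (k + 1)) = pstep (pre (nums.take k)) n := by
    rw [pre, htake, List.foldl_append]; rfl
  have hkey : pstep (oe, x) n = pre (nums.take (k + 1)) := by rw [hpre', hpre]
  rw [astep_apply]
  cases hget : d.get? (pstep (oe, x) n) with
  | some v =>
    obtain ⟨t0, hFo, hv⟩ : ∃ t0, Fo nums k (pstep (oe, x) n) = some t0 ∧ v = (t0 : Int) - 1 := by
      have := hd (pstep (oe, x) n)
      rw [hget] at this
      cases hFo2 : Fo nums k (pstep (oe, x) n) with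
      | none => rw [hFo2] at this; simp at this
      | some t0 => rw [hFo2] at this; exact ⟨t0, rfl, by simpa using this⟩
    obtain ⟨ht0k, ht0p, ht0min⟩ := Fo_spec nums k _ t0 hFo
    rw [hkey] at ht0p
    refine ⟨?_, ?_, ?_, ?_, ?_⟩
    · simp only []
      rw [← hkey]
    · intro s
      simp only []
      cases h2 : Fo nums k s with
      | some t =>
        rw [show Fo nums (k + 1) s = some t by simp only [Fo, h2]]
        rw [← h2, hd]
      | none =>
        have hne : pre (nums.take (k + 1)) ≠ s := by
          intro hc
          rw [← hc, ← hkey] at h2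
          rw [h2] at hFo
          simp at hFo
        rw [show Fo nums (k + 1) s = none by simp only [Fo, h2]; rw [if_neg hne]]
        rw [← h2, hd]
    · simp only []
      exact le_trans hnn (le_max_left _ _)
    · intro t u ht hu hpeq
      simp only []
      by_cases hu' : u ≤ k
      · exact le_trans (hub t u ht hu' hpeq) (le_max_left _ _)
      · have hu2 : u = k + 1 := by omega
        subst hu2
        have := ht0min t (by omega) (hpeq.symm.trans hkey.symm)
        have h6 : ((k : Int) + 1) - t ≤ (k : Int) - v := by omega
        refine le_trans (le_of_eq ?_) (le_trans h6 (le_max_right _ _))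
        push_cast; ring
    · simp only []
      rcases max_choice ans ((k : Int) - v) with hm | hm
      · rw [hm]
        exact hlb
      · rw [hm]
        right
        exact ⟨t0, k + 1, by omega, by omega, by rw [ht0p], by push_cast; omega⟩
  | none =>
    have hFo : Fo nums k (pstep (oe, x) n) = none := by
      have := hd (pstep (oe, x) n)
      rw [hget] at this
      cases hFo2 : Fo nums k (pstep (oe, x) n) with
      | none => rfl
      | some t0 => rw [hFo2] at this; simp at this
    refine ⟨?_, ?_, ?_, ?_, ?_⟩
    · rw [← hkey]
    · intro s
      by_cases hs : s = pstep (oe, x) n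
      · subst hs
        rw [PySem.Dict.get?_insert_self]
        rw [show Fo nums (k + 1) (pstep (oe, x) n) = some (k + 1) by
          simp only [Fo, hFo]; rw [if_pos hkey.symm]]
        simp only [Option.map]
        congr 1
        push_cast; ring
      · rw [PySem.Dict.get?_insert, if_neg hs]
        cases h2 : Fo nums k s with
        | some t =>
          rw [show Fo nums (k + 1) s = some t by simp only [Fo, h2]]
          rw [← h2, hd]
        | none =>
          have hne : pre (nums.take (k + 1)) ≠ s := by
            intro hc; exact hs (by rw [← hc, hkey])
          rw [show Fo nums (k + 1) s = none by simp only [Fo, h2]; rw [if_neg hne]]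
          rw [← h2, hd]
    · exact hnn
    · intro t u ht hu hpeq
      simp only []
      by_cases hu' : u ≤ k
      · exact hub t u ht hu' hpeq
      · exfalso
        have hu2 : u = k + 1 := by omega
        subst hu2
        have := Fo_none nums k _ hFo t (by omega)
        rw [hkey] at this
        exact this hpeq.symm
    · exact hlb

theorem A_eq (nums : List Int) : maxBalancedSubarray nums =
    ((PySem.List.enumerate nums 0).foldl astep
      ((PySem.Dict.empty).insert (0, 0) (-1), 0, 0, 0)).2.2.2 := rfl

theorem InvA_init (nums : List Int) :
    InvA nums 0 ((PySem.Dict.empty).insert (0, 0) (-1), 0, 0, 0) := by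
  refine ⟨rfl, ?_, le_refl 0, ?_, Or.inl rfl⟩
  · intro s
    by_cases hs : s = ((0 : Int), (0 : Int))
    · subst hs
      rw [PySem.Dict.get?_insert_self]
      rw [show Fo nums 0 ((0 : Int), (0 : Int)) = some 0 by simp only [Fo]; rw [if_pos (show pre (List.take 0 nums) = ((0:Int),(0:Int)) from rfl)]]
      simp
    · rw [PySem.Dict.get?_insert, if_neg hs, PySem.Dict.get?_empty]
      rw [show Fo nums 0 s = none by
        simp only [Fo]; rw [if_neg (fun hc => hs (by rw [← hc]; rfl))]]
      rfl
  · intro t u ht hu _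
    omega

theorem A_loop (nums : List Int) : ∀ (todo : List Int) (k : Nat)
    (st : PySem.Dict (Int × Int) Int × Int × Int × Int),
    nums.drop k = todo → k ≤ nums.length → InvA nums k st →
    InvA nums nums.length ((PySem.List.enumerate todo (k : Int)).foldl astep st) := by
  intro todo
  induction todo with
  | nil =>
    intro k st hdrop hk hInv
    rw [PySem.List.enumerate_nil, List.foldl_nil]
    have : k = nums.length := by
      have := List.drop_eq_nil_iff.1 hdrop
      omega
    rwa [this] at hInv
  | cons n todo' ih =>
    intro k st hdrop hk hInv
    have hlt : k < nums.length := by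
      by_contra h
      rw [List.drop_eq_nil_of_le (by omega)] at hdrop
      simp at hdrop
    have hn : nums[k]? = some n := by
      have h0 : (nums.drop k)[0]? = some n := by rw [hdrop]; rfl
      rwa [List.getElem?_drop, Nat.add_zero] at h0
    have hdrop' : nums.drop (k + 1) = todo' := by
      have : nums.drop (k + 1) = (nums.drop k).drop 1 := by
        rw [List.drop_drop, Nat.add_comm]
      rw [this, hdrop, List.drop_one, List.tail_cons]
    rw [PySem.List.enumerate.eq_2, List.foldl_cons]
    have hcast : (k : Int) + 1 = ((k + 1 : Nat) : Int) := by push_cast; ring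
    rw [hcast]
    exact ih (k + 1) _ hdrop' (by omega) (InvA_step nums k n hlt hn st hInv)

theorem A_spec_final (nums : List Int) :
    0 ≤ maxBalancedSubarray nums ∧
    (∀ t c : Nat, GoodSub nums t c → (c : Int) ≤ maxBalancedSubarray nums) ∧
    (maxBalancedSubarray nums = 0 ∨ ∃ t c : Nat, GoodSub nums t c ∧ maxBalancedSubarray nums = (c : Int)) := by
  have hInv := A_loop nums nums 0 ((PySem.Dict.empty).insert (0, 0) (-1), 0, 0, 0)
    (by simp) (Nat.zero_le _) (InvA_init nums)
  rw [show ((0 : Nat) : Int) = (0 : Int) from rfl] at hInv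
  rw [A_eq]
  obtain ⟨-, -, hnn, hub, hlb⟩ := hInv
  refine ⟨hnn, ?_, ?_⟩
  · intro t c ⟨h1, h2, h3⟩
    have := hub t (t + c) (by omega) h2 ((good_bridge nums t c).2 h3)
    push_cast at this ⊢
    omega
  · rcases hlb with h | ⟨t, u, ht, hu, hp, hv⟩
    · exact Or.inl h
    · right
      refine ⟨t, u - t, ⟨by omega, by omega, ?_⟩, by push_cast [Nat.cast_sub (le_of_lt ht)] at hv ⊢; omega⟩
      refine (good_bridge nums t (u - t)).1 ?_
      rwa [Nat.add_sub_cancel' (le_of_lt ht)]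


theorem B_spec_final (nums : List Int) :
    0 ≤ maxBalancedSubarray_alt nums ∧
    (∀ t c : Nat, GoodSub nums t c → (c : Int) ≤ maxBalancedSubarray_alt nums) ∧
    (maxBalancedSubarray_alt nums = 0 ∨ ∃ t c : Nat, GoodSub nums t c ∧ maxBalancedSubarray_alt nums = (c : Int)) :=
  ⟨mbsGo_ge nums 0, fun t c hg => mbsGo_ub nums 0 t c hg, mbsGo_lb nums 0⟩

theorem AB_eq (nums : List Int) : maxBalancedSubarray nums = maxBalancedSubarray_alt nums := by
  obtain ⟨hA0, hAub, hAlb⟩ := A_spec_final nums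
  obtain ⟨hB0, hBub, hBlb⟩ := B_spec_final nums
  refine le_antisymm ?_ ?_
  · rcases hAlb with h | ⟨t, c, hg, hv⟩
    · rw [h]; exact hB0
    · rw [hv]; exact hBub t c hg
  · rcases hBlb with h | ⟨t, c, hg, hv⟩
    · rw [h]; exact hA0
    · rw [hv]; exact hAub t c hg

-- ===== VERDICT (by name: the statement is the Claim_ definition above) =====
theorem maxBalancedSubarray_spec : Claim_equal_maxBalancedSubarray := by
  intro nums _
  unfold Spec_maxBalancedSubarray
  exact AB_eq nums
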